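-- pv_equiv track=rewrite | github.com/Bombberman1/Algo | lab2/src/pocker_game.py | play_pocker
-- ===== SOURCE A (Python) =====
-- def play_pocker(cards):
--     cards_set = set(cards)
--     jokers = cards.count(0)
--     max_length = 0
--
--     for card in cards_set:
--         if card != 0 and card - 1 not in cards_set:
--             current_length = 1
--             current_card = card + 1
--             available_jokers = jokers
--
--             while current_card in cards_set or available_jokers > 0:
--                 if current_card not in cards_set:
--                     available_jokers -= 1
--                 current_length += 1
--                 current_card += 1
--
--             max_length = max_length if max_length > current_length else current_length
--
--     return max_length
-- ===== SOURCE B (Python) =====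
-- from bisect import bisect_right
--
-- def play_pocker(cards):
--     cs = set(cards)
--     jokers = cards.count(0)
--     d = sorted(cs)
--     # key[k] = d[k] - k is nondecreasing because d is strictly increasing
--     key = [d[k] - k for k in range(len(d))]
--     best = 0
--     for i, s in enumerate(d):
--         if s == 0 or s - 1 in cs:
--             continue
--         # largest k with d[k] - d[i] - (k - i) <= jokers  (gaps up to d[k] coverable)
--         k = bisect_right(key, jokers + s - i) - 1
--         r = jokers - (d[k] - s - (k - i))   # jokers left after covering all gaps
--         best = max(best, d[k] + r - s + 1)
--     return best
-- ===== Notes on version B (the rewrite author's own statement) =====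
-- stated objective: alternative
-- what changed: Replaces A's per-start integer-by-integer joker walk over a hash set with a sorted distinct list plus, for each run start, a single binary search on the gap-prefix key d[k]-k locating how far the jokers reach.
import Mathlib
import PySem

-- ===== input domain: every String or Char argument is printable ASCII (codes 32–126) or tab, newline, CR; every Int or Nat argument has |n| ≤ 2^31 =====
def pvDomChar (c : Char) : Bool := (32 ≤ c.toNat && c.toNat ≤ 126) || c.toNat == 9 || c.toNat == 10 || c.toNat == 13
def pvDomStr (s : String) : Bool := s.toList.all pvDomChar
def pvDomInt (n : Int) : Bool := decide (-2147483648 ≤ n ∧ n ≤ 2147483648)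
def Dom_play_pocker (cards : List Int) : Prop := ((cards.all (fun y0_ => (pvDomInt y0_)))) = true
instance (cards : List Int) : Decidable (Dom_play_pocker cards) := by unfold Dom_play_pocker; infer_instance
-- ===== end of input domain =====

-- B replaces A's per-start integer-by-integer joker walk by sorted distinct cards plus a
-- binary search locating how far the jokers reach; equivalence is proved for all inputs.

-- ===== PORT A =====

-- termination helpers for the while-loop of A (cited by extendLoop's decreasing_by)
theorem pvFilterMono (S : List Int) (cur : Int) :
    (S.filter (fun x => decide (cur < x))).length ≤ (S.filter (fun x => decide (cur ≤ x))).length := by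
  induction S with
  | nil => simp
  | cons a t ih =>
    have := ih
    by_cases h1 : cur < a <;> by_cases h2 : cur ≤ a <;>
      simp [List.filter, h1, h2] <;> omega

theorem pvFilterLt (S : List Int) (cur : Int) (h : cur ∈ S) :
    (S.filter (fun x => decide (cur < x))).length < (S.filter (fun x => decide (cur ≤ x))).length := by
  induction S with
  | nil => simp at h
  | cons a t ih =>
    rcases List.mem_cons.mp h with rfl | hmem
    · have := pvFilterMono t cur
      simp [List.filter]
      omega
    · have := ih hmem
      by_cases h1 : cur < a <;> by_cases h2 : cur ≤ a <;>
        simp [List.filter, h1, h2] <;> omega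

-- the while-loop of A: while cur in S or jk > 0: (if cur not in S: jk -= 1); len += 1; cur += 1
def extendLoop (S : List Int) (len cur jk : Int) : Int :=
  if hin : cur ∈ S then extendLoop S (len + 1) (cur + 1) jk
  else if hj : 0 < jk then extendLoop S (len + 1) (cur + 1) (jk - 1)
  else len
termination_by jk.toNat + (S.filter (fun x => decide (cur ≤ x))).length
decreasing_by
  · simp only [Int.add_one_le_iff]
    have := pvFilterLt S cur hin
    omega
  · simp only [Int.add_one_le_iff]
    have := pvFilterMono S cur
    omega

def play_pocker (cards : List Int) : Int :=
  let cards_set : PySem.Set Int := PySem.Set.ofList cards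
  let jokers : Int := (PySem.List.count cards 0 : Int)
  cards_set.foldl (fun max_length card =>
    if card ≠ 0 ∧ (card - 1) ∉ cards_set then
      let current_length := extendLoop cards_set 1 (card + 1) jokers
      if max_length > current_length then max_length else current_length
    else max_length) 0

-- ===== PORT B =====
def play_pocker_alt (cards : List Int) : Int :=
  let cs : PySem.Set Int := PySem.Set.ofList cards
  let jokers : Int := (PySem.List.count cards 0 : Int)
  let d : List Int := PySem.List.sorted cs (fun x => x)
  let key : List Int := (PySem.List.pyRange 0 (PySem.List.len d) 1).map (fun k => PySem.List.pyGetD d k 0 - k)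
  (PySem.List.enumerate d).foldl (fun best is =>
    if is.2 = 0 ∨ (is.2 - 1) ∈ cs then best
    else
      let k : Int := (PySem.List.bisectRight key (jokers + is.2 - is.1) : Int) - 1
      let dk : Int := PySem.List.pyGetD d k 0
      let r : Int := jokers - (dk - is.2 - (k - is.1))
      max best (dk + r - is.2 + 1)) 0

-- ===== PRECONDITION & SPEC =====
def Spec_play_pocker (cards : List Int) (out : Int) : Prop := out = play_pocker_alt cards
instance (cards : List Int) (out : Int) : Decidable (Spec_play_pocker cards out) := by unfold Spec_play_pocker; infer_instance

-- ===== CLAIM (what is proved, stated in full; the proofs are below) =====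
def Claim_equal_play_pocker : Prop := ∀ (cards : List Int), Dom_play_pocker cards → Spec_play_pocker cards (play_pocker cards)

-- ===== LEMMAS AND PROOFS =====

-- one-step equations for extendLoop
theorem E_mem (S : List Int) (len cur jk : Int) (h : cur ∈ S) :
    extendLoop S len cur jk = extendLoop S (len + 1) (cur + 1) jk := by
  rw [extendLoop]; simp [h]

theorem E_jok (S : List Int) (len cur jk : Int) (h : cur ∉ S) (hj : 0 < jk) :
    extendLoop S len cur jk = extendLoop S (len + 1) (cur + 1) (jk - 1) := by
  rw [extendLoop]; simp [h, hj]

theorem E_stop (S : List Int) (len cur jk : Int) (h : cur ∉ S) (hj : ¬ 0 < jk) :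
    extendLoop S len cur jk = len := by
  rw [extendLoop]; simp [h, hj]

-- skipping a block of t integers none of which is in S consumes t jokers
theorem E_skip (S : List Int) : ∀ (t : Nat) (len cur jk : Int), (t : Int) ≤ jk →
    (∀ x : Int, cur ≤ x → x < cur + t → x ∉ S) →
    extendLoop S len cur jk = extendLoop S (len + t) (cur + t) (jk - t) := by
  intro t
  induction t with
  | zero => intro len cur jk _ _; simp
  | succ t ih =>
    intro len cur jk h1 h2
    have hcur : cur ∉ S := h2 cur le_rfl (by push_cast; omega)
    rw [E_jok S len cur jk hcur (by push_cast at h1 ⊢; omega)]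
    rw [ih (len + 1) (cur + 1) (jk - 1) (by push_cast at h1 ⊢; omega)
        (fun x hx1 hx2 => h2 x (by omega) (by push_cast at hx2 ⊢; omega))]
    congr 1 <;> push_cast <;> ring

-- proof-only device: walk the sorted distinct list gap by gap
def gapWalk (d : List Int) (j : Nat) (r : Int) : Int :=
  if h : j + 1 < d.length ∧ d.getD (j + 1) 0 - d.getD j 0 - 1 ≤ r then
    gapWalk d (j + 1) (r - (d.getD (j + 1) 0 - d.getD j 0 - 1))
  else d.getD j 0 + r
termination_by d.length - j
decreasing_by omega

-- strictly increasing list: gaps are at least the index differences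
theorem pvStep (d : List Int) (hd : d.Pairwise (· < ·)) (m : Nat) (hm : m + 1 < d.length) :
    d.getD m 0 < d.getD (m + 1) 0 := by
  have h := List.pairwise_iff_getElem.mp hd m (m + 1) (by omega) hm (by omega)
  rwa [List.getD_eq_getElem d 0 (by omega), List.getD_eq_getElem d 0 hm]

theorem pvStrictGaps (d : List Int) (hd : d.Pairwise (· < ·)) :
    ∀ (p q : Nat), p ≤ q → q < d.length → d.getD p 0 + ((q : Int) - p) ≤ d.getD q 0 := by
  intro p q hpq hq
  obtain ⟨n, rfl⟩ := Nat.exists_eq_add_of_le hpq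
  induction n with
  | zero => simp
  | succ n ih =>
    have h1 := pvStep d hd (p + n) (by omega)
    have h2 := ih (by omega) (by omega)
    push_cast at h2 ⊢
    have : p + (n + 1) = (p + n) + 1 := by omega
    rw [this]
    omega

theorem pvNoBetween (d : List Int) (hd : d.Pairwise (· < ·)) (j : Nat) (hj1 : j + 1 < d.length)
    (x : Int) (hx : x ∈ d) : ¬ (d.getD j 0 < x ∧ x < d.getD (j + 1) 0) := by
  rintro ⟨h1, h2⟩
  obtain ⟨m, hm, rfl⟩ := List.mem_iff_getElem.mp hx
  rcases Nat.lt_or_ge j m with hgt | hle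
  · have := pvStrictGaps d hd (j + 1) m hgt hm
    rw [List.getD_eq_getElem d 0 hm] at this
    push_cast at this
    omega
  · have := pvStrictGaps d hd m j hle (by omega)
    rw [List.getD_eq_getElem d 0 hm] at this
    omega

theorem pvAboveMax (d : List Int) (hd : d.Pairwise (· < ·)) (j : Nat) (hj : j < d.length)
    (hlast : ¬ j + 1 < d.length) (x : Int) (hx : x ∈ d) : x ≤ d.getD j 0 := by
  obtain ⟨m, hm, rfl⟩ := List.mem_iff_getElem.mp hx
  have := pvStrictGaps d hd m j (by omega) hj
  rw [List.getD_eq_getElem d 0 hm] at this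
  omega

-- A's integer walk equals the gap walk over the sorted distinct list
theorem pvExtendEqGapWalk (S d : List Int) (hd : d.Pairwise (· < ·))
    (hmem : ∀ x : Int, x ∈ S ↔ x ∈ d) :
    ∀ (n j : Nat) (r len : Int), d.length - j = n → j < d.length → 0 ≤ r →
      extendLoop S len (d.getD j 0 + 1) r = len + (gapWalk d j r - d.getD j 0) := by
  intro n
  induction n with
  | zero => intro j r len hn hj hr; omega
  | succ n ih =>
    intro j r len hn hj hr
    rw [gapWalk]
    by_cases hcond : j + 1 < d.length ∧ d.getD (j + 1) 0 - d.getD j 0 - 1 ≤ r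
    · obtain ⟨hj1, hgle⟩ := hcond
      have hg0 : 0 ≤ d.getD (j + 1) 0 - d.getD j 0 - 1 := by have := pvStep d hd j hj1; omega
      have hcast : ((d.getD (j + 1) 0 - d.getD j 0 - 1).toNat : Int) = d.getD (j + 1) 0 - d.getD j 0 - 1 :=
        Int.toNat_of_nonneg hg0
      have hskip := E_skip S (d.getD (j + 1) 0 - d.getD j 0 - 1).toNat len (d.getD j 0 + 1) r
        (by omega)
        (fun x hx1 hx2 hxS => pvNoBetween d hd j hj1 x ((hmem x).mp hxS) ⟨by omega, by omega⟩)
      rw [hskip, hcast]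
      rw [show d.getD j 0 + 1 + (d.getD (j + 1) 0 - d.getD j 0 - 1) = d.getD (j + 1) 0 from by ring]
      have hmemd1 : d.getD (j + 1) 0 ∈ S := by
        rw [List.getD_eq_getElem d 0 hj1]
        exact (hmem _).mpr (List.getElem_mem hj1)
      rw [E_mem S _ _ _ hmemd1]
      rw [ih (j + 1) (r - (d.getD (j + 1) 0 - d.getD j 0 - 1))
          (len + (d.getD (j + 1) 0 - d.getD j 0 - 1) + 1) (by omega) hj1 (by omega)]
      rw [dif_pos ⟨hj1, hgle⟩]
      omega
    · rw [dif_neg hcond]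
      have hnotin : ∀ x : Int, d.getD j 0 < x → x ≤ d.getD j 0 + r + 1 → x ∉ S := by
        intro x h1 h2 hxS
        have hxd := (hmem x).mp hxS
        by_cases hj1 : j + 1 < d.length
        · have hgr : ¬ (d.getD (j + 1) 0 - d.getD j 0 - 1 ≤ r) := fun h => hcond ⟨hj1, h⟩
          exact pvNoBetween d hd j hj1 x hxd ⟨h1, by omega⟩
        · exact absurd (pvAboveMax d hd j hj hj1 x hxd) (by omega)
      have hrcast : (r.toNat : Int) = r := Int.toNat_of_nonneg hr
      have hskip := E_skip S r.toNat len (d.getD j 0 + 1) r (by omega)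
        (fun x hx1 hx2 => hnotin x (by omega) (by omega))
      rw [hskip, hrcast]
      rw [E_stop S _ _ _ (hnotin _ (by omega) (by omega)) (by omega)]
      omega

-- the gap walk stops exactly at the bisection index
theorem pvGapWalkStop (d : List Int) (hd : d.Pairwise (· < ·)) :
    ∀ (n j k : Nat) (target : Int), k - j = n → j ≤ k → k < d.length →
      d.getD k 0 - k ≤ target → (k + 1 < d.length → target < d.getD (k + 1) 0 - (k + 1)) →
      gapWalk d j (target - (d.getD j 0 - j)) = target + k := by
  intro n
  induction n with
  | zero =>
    intro j k target hn hjk hk hle hstop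
    have hjeq : j = k := by omega
    subst hjeq
    rw [gapWalk]
    by_cases hc : j + 1 < d.length ∧ d.getD (j + 1) 0 - d.getD j 0 - 1 ≤ target - (d.getD j 0 - j)
    · exfalso
      obtain ⟨h1, h2⟩ := hc
      have := hstop h1
      push_cast at this
      omega
    · rw [dif_neg hc]
      ring
  | succ n ih =>
    intro j k target hn hjk hk hle hstop
    rw [gapWalk]
    have hj1 : j + 1 < d.length := by omega
    have hkey : d.getD (j + 1) 0 - ((j : Int) + 1) ≤ d.getD k 0 - k := by
      have := pvStrictGaps d hd (j + 1) k (by omega) hk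
      push_cast at this
      omega
    have hcond : j + 1 < d.length ∧ d.getD (j + 1) 0 - d.getD j 0 - 1 ≤ target - (d.getD j 0 - j) :=
      ⟨hj1, by omega⟩
    rw [dif_pos hcond]
    rw [show target - (d.getD j 0 - (j : Int)) - (d.getD (j + 1) 0 - d.getD j 0 - 1)
        = target - (d.getD (j + 1) 0 - ((j + 1 : Nat) : Int)) from by push_cast; ring]
    exact ih (j + 1) k target (by omega) (by omega) hk hle hstop

-- the key list of B: key[m] = d[m] - m
def pvKey (d : List Int) : List Int := (List.range d.length).map (fun m => d.getD m 0 - (m : Int))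

theorem pvKeyGet (d : List Int) (m : Nat) (h : m < (pvKey d).length) :
    (pvKey d)[m] = d.getD m 0 - (m : Int) := by
  simp [pvKey]

theorem pvKeyPairwise (d : List Int) (hd : d.Pairwise (· < ·)) :
    (pvKey d).Pairwise (· ≤ ·) := by
  rw [List.pairwise_iff_getElem]
  intro p q hp hq hpq
  rw [pvKeyGet d p hp, pvKeyGet d q hq]
  have := pvStrictGaps d hd p q (le_of_lt hpq) (by simpa [pvKey] using hq)
  omega

theorem pvKeyEq (d : List Int) :
    (PySem.List.pyRange 0 (PySem.List.len d) 1).map (fun k => PySem.List.pyGetD d k 0 - k)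
      = pvKey d := by
  rw [PySem.List.len_eq, PySem.List.pyRange_of_pos 0 _ (by norm_num)]
  have hcnt : (if (0 : Int) < (d.length : Int) then (((d.length : Int) - 0 + 1 - 1) / 1).toNat else 0)
      = d.length := by
    split_ifs with h
    · norm_num
    · omega
  rw [hcnt, pvKey, List.map_map]
  apply List.map_congr_left
  intro m _
  simp [PySem.List.pyGetD_natCast]

-- the per-start value of B (binary search) equals A's joker walk
theorem pvPerStart (S d : List Int) (J : Int) (hd : d.Pairwise (· < ·))
    (hmem : ∀ x : Int, x ∈ S ↔ x ∈ d) (hJ : 0 ≤ J) (i : Nat) (hi : i < d.length) :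
    (let k : Int := (PySem.List.bisectRight (pvKey d) (J + d.getD i 0 - (i : Int)) : Int) - 1;
     let dk : Int := PySem.List.pyGetD d k 0;
     dk + (J - (dk - d.getD i 0 - (k - (i : Int)))) - d.getD i 0 + 1)
      = extendLoop S 1 (d.getD i 0 + 1) J := by
  have hlen : (pvKey d).length = d.length := by simp [pvKey]
  obtain ⟨hclen, hlow, hhigh⟩ :=
    PySem.List.bisectRight_spec (pvKey d) (J + d.getD i 0 - (i : Int)) (pvKeyPairwise d hd)
  set target : Int := J + d.getD i 0 - (i : Int) with htarget
  set c : Nat := PySem.List.bisectRight (pvKey d) target with hc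
  have hic : i < c := by
    by_contra h
    have h2 := hhigh i (by omega) (by omega)
    rw [pvKeyGet d i (by omega)] at h2
    omega
  have hkd : c - 1 < d.length := by omega
  have hkey_le : d.getD (c - 1) 0 - ((c : Int) - 1) ≤ target := by
    have h2 := hlow (c - 1) (by omega) (by omega)
    rw [pvKeyGet d (c - 1) (by omega)] at h2
    omega
  have hstop : (c - 1) + 1 < d.length → target < d.getD ((c - 1) + 1) 0 - (((c - 1) + 1 : Nat) : Int) := by
    intro h
    have h2 := hhigh ((c - 1) + 1) (by omega) (by omega)
    rw [pvKeyGet d ((c - 1) + 1) (by omega)] at h2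
    omega
  have hwalk := pvGapWalkStop d hd ((c - 1) - i) i (c - 1) target rfl (by omega) hkd
    (by omega) hstop
  have hJeq : target - (d.getD i 0 - (i : Int)) = J := by omega
  rw [hJeq] at hwalk
  have hext := pvExtendEqGapWalk S d hd hmem (d.length - i) i J 1 rfl hi hJ
  rw [hwalk] at hext
  rw [hext]
  show PySem.List.pyGetD d ((c : Int) - 1) 0 + _ - _ + 1 = _
  rw [show ((c : Int) - 1) = (((c - 1 : Nat)) : Int) from by omega]
  rw [PySem.List.pyGetD_natCast]
  omega

-- the shared fold body
def pvF (S : List Int) (J : Int) : Int → Int → Int :=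
  fun acc s => if s = 0 ∨ (s - 1) ∈ S then acc else max acc (extendLoop S 1 (s + 1) J)

theorem pvAfold (cards : List Int) :
    play_pocker cards = (PySem.Set.ofList cards).foldl
      (pvF (PySem.Set.ofList cards) ((PySem.List.count cards 0 : Nat) : Int)) 0 := by
  simp only [play_pocker]
  apply PySem.List.foldl_congr_mem
  intro acc x _
  by_cases hc : x = 0 ∨ (x - 1) ∈ PySem.Set.ofList cards
  · have hnc : ¬ (x ≠ 0 ∧ (x - 1) ∉ PySem.Set.ofList cards) := by tauto
    simp only [pvF, if_pos hc, if_neg hnc]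
  · have hc2 : x ≠ 0 ∧ (x - 1) ∉ PySem.Set.ofList cards := by tauto
    simp only [pvF, if_pos hc2, if_neg hc]
    split_ifs <;> omega

theorem pvBfold (cards : List Int) :
    play_pocker_alt cards = (PySem.List.sorted (PySem.Set.ofList cards) (fun x => x)).foldl
      (pvF (PySem.Set.ofList cards) ((PySem.List.count cards 0 : Nat) : Int)) 0 := by
  have hd := PySem.List.sorted_ofList_pairwise_lt (κ := Int) cards
  have hmem : ∀ x : Int, x ∈ PySem.Set.ofList cards ↔
      x ∈ PySem.List.sorted (PySem.Set.ofList cards) (fun x => x) :=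
    fun x => (PySem.List.mem_sorted _ _ _ x).symm
  simp only [play_pocker_alt]
  simp only [pvKeyEq]
  rw [PySem.List.enumerate_eq_zipIdx_map, List.foldl_map]
  rw [PySem.List.foldl_congr_mem _ _
    (fun acc p => pvF (PySem.Set.ofList cards) ((PySem.List.count cards 0 : Nat) : Int) acc p.1) 0 ?_]
  · conv_rhs => rw [← List.zipIdx_map_fst 0 (PySem.List.sorted (PySem.Set.ofList cards) (fun x => x))]
    rw [List.foldl_map]
  · rintro acc ⟨x, m⟩ hp
    obtain ⟨-, hm, hx⟩ := List.mem_zipIdx hp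
    simp only [Nat.sub_zero] at hx
    simp only [zero_add]
    show (if x = 0 ∨ (x - 1) ∈ PySem.Set.ofList cards then acc else _) = pvF _ _ acc x
    unfold pvF
    split_ifs with h
    · rfl
    · have hm' : m < (PySem.List.sorted (PySem.Set.ofList cards) (fun x => x)).length := by omega
      have hgd : (PySem.List.sorted (PySem.Set.ofList cards) (fun x => x)).getD m 0 = x := by
        rw [List.getD_eq_getElem _ 0 hm', ← hx]
      have := pvPerStart (PySem.Set.ofList cards)
        (PySem.List.sorted (PySem.Set.ofList cards) (fun x => x))
        ((PySem.List.count cards 0 : Nat) : Int) hd hmem (by positivity) m hm'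
      rw [hgd] at this
      rw [← this]

theorem pvPermFold (S : List Int) (J : Int) {l1 l2 : List Int} (hp : l1.Perm l2) :
    l1.foldl (pvF S J) 0 = l2.foldl (pvF S J) 0 := by
  letI : RightCommutative (pvF S J) := ⟨fun a x y => by unfold pvF; split_ifs <;> omega⟩
  exact hp.foldl_eq 0

-- ===== VERDICT (by name: the statement is the Claim_ definition above) =====
theorem play_pocker_spec : Claim_equal_play_pocker := by
  intro cards _
  unfold Spec_play_pocker
  rw [pvAfold cards, pvBfold cards]
  exact (pvPermFold _ _ (PySem.List.sorted_perm _ _ _)).symm
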